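-- pv_equiv track=rewrite | github.com/bit-flipping-alejo/CST-205 | mod 6/lab14.py | splitAllLines
-- ===== SOURCE A (Python) =====
-- def splitAllLines(allLinesList):
--   totalWords = list()
--   word = ""
--   # if an element in the list is just "\n", skip
--   for row in allLinesList:
--     if row == "\n":
--       continue
--     else:
--       for letter in row:
--         # add each character into a word if it is not a space or newline
--         if letter == "\n":
--           totalWords.append(word)
--           word = ""
--           continue
--         else:
--           word += letter
--   return totalWords
-- ===== SOURCE B (Python) =====
-- def splitAllLines(allLinesList):
--     # join-then-split: concatenate all rows except bare "\n" rows, split on newlines,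
--     # drop the trailing segment (A never appends the text after the last newline)
--     text = "".join(row for row in allLinesList if row != "\n")
--     return text.split("\n")[:-1]
-- ===== Notes on version B (the rewrite author's own statement) =====
-- stated objective: faster
-- what changed: Replaced the two-level character-accumulation loop (outer over rows, inner over letters, mutable word buffer) with a single join of the non-"\n" rows followed by str.split("\n")[:-1].
import Mathlib
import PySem

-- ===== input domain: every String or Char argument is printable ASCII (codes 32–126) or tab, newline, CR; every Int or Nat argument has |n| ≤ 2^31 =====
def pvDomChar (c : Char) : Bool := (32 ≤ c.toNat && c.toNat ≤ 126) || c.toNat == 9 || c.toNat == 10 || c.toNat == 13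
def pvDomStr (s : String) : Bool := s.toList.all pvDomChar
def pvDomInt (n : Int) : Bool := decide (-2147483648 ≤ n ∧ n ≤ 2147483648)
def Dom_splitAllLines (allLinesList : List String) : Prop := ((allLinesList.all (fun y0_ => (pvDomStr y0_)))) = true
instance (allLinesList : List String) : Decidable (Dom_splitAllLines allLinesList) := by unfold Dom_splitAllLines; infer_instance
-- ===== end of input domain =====

-- B replaces A's two-level character-accumulation loop with join-then-split ([:-1] drops the trailing open word); measured faster in a timing run.

-- ===== PORT A =====
-- inner loop body: 'for letter in row: if letter == "\n": append word; word = "" else: word += letter'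
def pvStepChar (st : List String × List Char) (letter : Char) : List String × List Char :=
  if letter = '\n' then (st.1 ++ [String.ofList st.2], []) else (st.1, st.2 ++ [letter])

-- outer loop body: 'if row == "\n": continue else: <inner loop>'
def pvStepRow (st : List String × List Char) (row : String) : List String × List Char :=
  if row = "\n" then st else row.toList.foldl pvStepChar st

def splitAllLines (allLinesList : List String) : List String :=
  (allLinesList.foldl pvStepRow ([], [])).1

-- ===== PORT B =====
def splitAllLines_alt (allLinesList : List String) : List String :=
  let text : List Char :=
    PySem.Chars.join [] ((allLinesList.filter (fun row => row != "\n")).map String.toList)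
  (PySem.List.slice (PySem.Chars.splitOn text ['\n']) none (some (-1))).map String.ofList

-- ===== PRECONDITION & SPEC =====
def Spec_splitAllLines (allLinesList : List String) (out : List String) : Prop := out = splitAllLines_alt allLinesList
instance (allLinesList : List String) (out : List String) : Decidable (Spec_splitAllLines allLinesList out) := by unfold Spec_splitAllLines; infer_instance

-- ===== CLAIM (what is proved, stated in full; the proofs are below) =====
def Claim_equal_splitAllLines : Prop := ∀ (allLinesList : List String), Dom_splitAllLines allLinesList → Spec_splitAllLines allLinesList (splitAllLines allLinesList)

-- ===== LEMMAS AND PROOFS =====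

-- simple specification of splitting a char list on '\n'
def pvSplit1 : List Char → List (List Char)
  | [] => [[]]
  | c :: r => if c = '\n' then [] :: pvSplit1 r
              else match pvSplit1 r with
                   | [] => [[c]]
                   | h :: t => (c :: h) :: t

def pvConsHead (w : List Char) : List (List Char) → List (List Char)
  | [] => [w]
  | p :: t => (w ++ p) :: t

theorem pvSplit1_ne_nil (cs : List Char) : pvSplit1 cs ≠ [] := by
  cases cs with
  | nil => simp [pvSplit1]
  | cons c r =>
    simp only [pvSplit1]
    split
    · simp
    · cases h : pvSplit1 r <;> simp

theorem pv_getLast?_cons_of_ne_nil {a : List Char} {l : List (List Char)} (h : l ≠ []) :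
    (a :: l).getLast? = l.getLast? := by
  cases l with
  | nil => exact absurd rfl h
  | cons b t => simp [List.getLast?_cons_cons]

theorem pvConsHead_nil (ps : List (List Char)) (h : ps ≠ []) : pvConsHead [] ps = ps := by
  cases ps with
  | nil => exact absurd rfl h
  | cons p t => simp [pvConsHead]

theorem pv_go_eq (fuel : Nat) (l cur : List Char) (acc : List (List Char))
    (h : l.length ≤ fuel) :
    PySem.Chars.splitOn.go ['\n'] fuel l cur acc
      = acc.reverse ++ pvConsHead cur.reverse (pvSplit1 l) := by
  induction fuel generalizing l cur acc with
  | zero =>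
    have : l = [] := by cases l <;> simp_all
    subst this
    simp [PySem.Chars.splitOn.go, pvSplit1, pvConsHead]
  | succ f ih =>
    cases l with
    | nil => simp [PySem.Chars.splitOn.go, pvSplit1, pvConsHead]
    | cons c rest =>
      simp only [PySem.Chars.splitOn.go]
      by_cases hc : c = '\n'
      · subst hc
        have hpre : (['\n'] : List Char).isPrefixOf ('\n' :: rest) = true := by
          simp [List.isPrefixOf]
        rw [if_pos hpre]
        have hr : rest.length ≤ f := by simpa using h
        simp only [List.length_cons, List.length_nil, List.drop_succ_cons, List.drop_zero]
        rw [ih rest [] (cur.reverse :: acc) hr]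
        rw [show pvSplit1 ('\n' :: rest) = [] :: pvSplit1 rest from by simp [pvSplit1]]
        cases hs : pvSplit1 rest with
        | nil => exact absurd hs (pvSplit1_ne_nil rest)
        | cons hh tt => simp [pvConsHead]
      · have hpre : (['\n'] : List Char).isPrefixOf (c :: rest) = false := by
          simp [List.isPrefixOf]
          intro hcontra
          exact hc hcontra.symm
        rw [if_neg (by simp [hpre])]
        have hr : rest.length ≤ f := by simpa using h
        rw [ih rest (c :: cur) acc hr]
        simp only [pvSplit1, if_neg hc]
        cases hs : pvSplit1 rest with
        | nil => exact absurd hs (pvSplit1_ne_nil rest)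
        | cons hh tt => simp [pvConsHead]

theorem pv_splitOn_eq (l : List Char) :
    PySem.Chars.splitOn l ['\n'] = pvSplit1 l := by
  unfold PySem.Chars.splitOn
  rw [pv_go_eq (l.length + 1) l [] [] (by omega)]
  simp [pvConsHead_nil _ (pvSplit1_ne_nil l)]

-- the inner character loop computes (words so far, open word) from pvSplit1
theorem pv_inner_eq (cs : List Char) (ws : List String) (w : List Char) :
    cs.foldl pvStepChar (ws, w)
      = (ws ++ ((pvConsHead w (pvSplit1 cs)).dropLast).map String.ofList,
         ((pvConsHead w (pvSplit1 cs)).getLast?).getD []) := by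
  induction cs generalizing ws w with
  | nil => simp [pvSplit1, pvConsHead]
  | cons c r ih =>
    by_cases hc : c = '\n'
    · subst hc
      rw [List.foldl_cons, show pvStepChar (ws, w) '\n' = (ws ++ [String.ofList w], []) from by
        simp [pvStepChar]]
      rw [ih]
      have hne := pvSplit1_ne_nil r
      rw [pvConsHead_nil _ hne,
        show pvSplit1 ('\n' :: r) = [] :: pvSplit1 r from by simp [pvSplit1],
        show pvConsHead w ([] :: pvSplit1 r) = w :: pvSplit1 r from by simp [pvConsHead]]
      rw [List.dropLast_cons_of_ne_nil hne, pv_getLast?_cons_of_ne_nil hne]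
      simp
    · rw [List.foldl_cons, show pvStepChar (ws, w) c = (ws, w ++ [c]) from by
        simp [pvStepChar, hc]]
      rw [ih]
      simp only [pvSplit1, if_neg hc]
      cases hs : pvSplit1 r with
      | nil => exact absurd hs (pvSplit1_ne_nil r)
      | cons hh tt => simp [pvConsHead]

theorem pv_join_nil_cons (x : List Char) (rest : List (List Char)) :
    PySem.Chars.join [] (x :: rest) = x ++ PySem.Chars.join [] rest := by
  cases rest <;> simp [PySem.Chars.join, List.intercalate]

-- the outer row loop is the inner loop over the joined filtered text
theorem pv_outer_eq (rows : List String) (st : List String × List Char) :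
    rows.foldl pvStepRow st
      = (PySem.Chars.join [] ((rows.filter (fun row => row != "\n")).map String.toList)).foldl
          pvStepChar st := by
  induction rows generalizing st with
  | nil => simp [PySem.Chars.join_nil]
  | cons row rest ih =>
    by_cases hr : row = "\n"
    · subst hr
      rw [List.foldl_cons, show pvStepRow st "\n" = st from by simp [pvStepRow],
        show List.filter (fun row => row != "\n") ("\n" :: rest)
            = List.filter (fun row => row != "\n") rest from by simp]
      exact ih st
    · rw [List.foldl_cons, show pvStepRow st row = row.toList.foldl pvStepChar st from by
        simp [pvStepRow, hr],
        show List.filter (fun r => r != "\n") (row :: rest)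
            = row :: List.filter (fun r => r != "\n") rest from by simp [hr]]
      rw [List.map_cons, pv_join_nil_cons, List.foldl_append]
      exact ih _

-- ===== VERDICT (by name: the statement is the Claim_ definition above) =====
theorem splitAllLines_spec : Claim_equal_splitAllLines := by
  intro allLinesList _
  simp only [Spec_splitAllLines, splitAllLines, splitAllLines_alt]
  rw [pv_outer_eq]
  rw [pv_inner_eq]
  rw [pv_splitOn_eq, PySem.List.slice_to_neg_one]
  rw [pvConsHead_nil _ (pvSplit1_ne_nil _)]
  simp
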